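-- pv_equiv track=rewrite | github.com/ernlavr/multihal | src/kgs/querybuilder.py | get_multihop_select_where_vars
-- ===== SOURCE A (Python) =====
-- def get_multihop_select_where_vars(subj, obj=None, hops=1):
--     select_vars = [f"?p1", f"?o1"]
--     where_clauses = [f"wd:{subj}", f"?p1", f"?o1 ."] # always start with subject
--
--
--     for i in range(2, hops + 1):
--         select_vars.append(f"?p{i}")
--         select_vars.append(f"?o{i}")
--
--         where_clauses.append(f"?o{i - 1}")
--         where_clauses.append(f"?p{i}")
--         where_clauses.append(f"?o{i} .")
--
--     # always replace the last object with the target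
--     if obj is not None:
--         select_vars.pop(-1)
--         where_clauses[-1] = f"wd:{obj} ."
--
--     return select_vars, where_clauses
-- ===== SOURCE B (Python) =====
-- def get_multihop_select_where_vars(subj, obj=None, hops=1):
--     n = max(hops, 1)
--     # chain of nodes: subject, then intermediate objects; last node is the target if given
--     nodes = [f"wd:{subj}"] + [f"?o{i}" for i in range(1, n + 1)]
--     if obj is not None:
--         nodes[-1] = f"wd:{obj}"
--     select_vars = [v for i in range(1, n + 1) for v in (f"?p{i}", f"?o{i}")]
--     if obj is not None:
--         select_vars.pop()
--     where_clauses = [t for i in range(1, n + 1)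
--                      for t in (nodes[i - 1], f"?p{i}", nodes[i] + " .")]
--     return select_vars, where_clauses
-- ===== Notes on version B (the rewrite author's own statement) =====
-- stated objective: alternative
-- what changed: B builds an explicit node chain [wd:subj, ?o1, ..., ?on] with the target object spliced in up front and emits select vars and where triples in single flatten passes over the hops, instead of A's incremental append loop followed by pop()/overwrite of the tail.
import Mathlib
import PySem

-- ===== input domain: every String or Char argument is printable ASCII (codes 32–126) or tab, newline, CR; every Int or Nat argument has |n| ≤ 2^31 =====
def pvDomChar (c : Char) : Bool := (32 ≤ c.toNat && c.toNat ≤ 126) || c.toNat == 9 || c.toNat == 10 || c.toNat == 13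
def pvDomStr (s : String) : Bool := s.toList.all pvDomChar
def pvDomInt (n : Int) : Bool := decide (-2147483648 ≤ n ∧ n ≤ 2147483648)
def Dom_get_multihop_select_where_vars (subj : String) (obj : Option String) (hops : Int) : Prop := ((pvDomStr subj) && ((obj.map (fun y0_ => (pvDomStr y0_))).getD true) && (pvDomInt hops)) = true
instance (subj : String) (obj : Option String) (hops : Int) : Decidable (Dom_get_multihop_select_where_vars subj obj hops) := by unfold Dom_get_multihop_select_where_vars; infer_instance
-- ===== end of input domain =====

-- B decides the object substitution during construction (a node chain + one flatMap pass)
-- instead of A's build-generically-then-pop/overwrite; objective: alternative decomposition, not faster.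

-- ===== PORT A =====
def get_multihop_select_where_vars (subj : String) (obj : Option String) (hops : Int) : List String × List String :=
  let select_vars : List String := ["?p1", "?o1"]
  let where_clauses : List String := ["wd:" ++ subj, "?p1", "?o1 ."]
  let st := (PySem.List.pyRange 2 (hops + 1) 1).foldl
    (fun (st : List String × List String) i =>
      (st.1 ++ ["?p" ++ PySem.Int.toStr i, "?o" ++ PySem.Int.toStr i],
       st.2 ++ ["?o" ++ PySem.Int.toStr (i - 1), "?p" ++ PySem.Int.toStr i,
                "?o" ++ PySem.Int.toStr i ++ " ."]))
    (select_vars, where_clauses)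
  match obj with
  | some t => (st.1.dropLast, st.2.dropLast ++ ["wd:" ++ t ++ " ."])  -- pop(-1) / [-1]= on always-nonempty lists
  | none => st

-- ===== PORT B =====
def get_multihop_select_where_vars_alt (subj : String) (obj : Option String) (hops : Int) : List String × List String :=
  let n : Int := max hops 1
  let nodes : List String :=
    ("wd:" ++ subj) :: (PySem.List.pyRange 1 (n + 1) 1).map (fun i => "?o" ++ PySem.Int.toStr i)
  let nodes := match obj with
    | some t => nodes.dropLast ++ ["wd:" ++ t]  -- nodes[-1] = …
    | none => nodes
  let select_vars := (PySem.List.pyRange 1 (n + 1) 1).flatMap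
    (fun i => ["?p" ++ PySem.Int.toStr i, "?o" ++ PySem.Int.toStr i])
  let select_vars := match obj with
    | some _ => select_vars.dropLast  -- .pop() on an always-nonempty list
    | none => select_vars
  let where_clauses := (PySem.List.pyRange 1 (n + 1) 1).flatMap
    (fun i => [PySem.List.pyGetD nodes (i - 1) "", "?p" ++ PySem.Int.toStr i,
               PySem.List.pyGetD nodes i "" ++ " ."])  -- indices always in range
  (select_vars, where_clauses)

-- ===== PRECONDITION & SPEC =====
def Spec_get_multihop_select_where_vars (subj : String) (obj : Option String) (hops : Int) (out : List String × List String) : Prop := out = get_multihop_select_where_vars_alt subj obj hops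
instance (subj : String) (obj : Option String) (hops : Int) (out : List String × List String) : Decidable (Spec_get_multihop_select_where_vars subj obj hops out) := by unfold Spec_get_multihop_select_where_vars; infer_instance

-- ===== CLAIM (what is proved, stated in full; the proofs are below) =====
def Claim_equal_get_multihop_select_where_vars : Prop := ∀ (subj : String) (obj : Option String) (hops : Int), Dom_get_multihop_select_where_vars subj obj hops → Spec_get_multihop_select_where_vars subj obj hops (get_multihop_select_where_vars subj obj hops)

-- ===== LEMMAS AND PROOFS =====

-- per-hop select variables
def pvFS (i : Int) : List String := ["?p" ++ PySem.Int.toStr i, "?o" ++ PySem.Int.toStr i]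
-- per-hop where triple (object left generic)
def pvFW (s : String) (i : Int) : List String :=
  [if i = 1 then "wd:" ++ s else "?o" ++ PySem.Int.toStr (i - 1),
   "?p" ++ PySem.Int.toStr i, "?o" ++ PySem.Int.toStr i ++ " ."]
-- node j of the chain (no target object)
def pvNode (s : String) (j : Int) : String := if j = 0 then "wd:" ++ s else "?o" ++ PySem.Int.toStr j

lemma pvFS_one : pvFS 1 = ["?p1", "?o1"] := by decide

lemma pvFW_one (s : String) : pvFW s 1 = ["wd:" ++ s, "?p1", "?o1 ."] := by
  simp [pvFW]; decide

-- head of pvFW i coincides with node i-1 of the plain chain, for i ≥ 1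
lemma pvFW_eq_node (s : String) (i : Int) (hi : 1 ≤ i) :
    pvFW s i = [pvNode s (i - 1), "?p" ++ PySem.Int.toStr i, "?o" ++ PySem.Int.toStr i ++ " ."] := by
  rcases eq_or_ne i 1 with h1 | h1
  · subst h1; simp [pvFW, pvNode]
  · simp [pvFW, pvNode, h1, show i - 1 ≠ 0 by omega]

lemma A_char (s : String) (o : Option String) (h : Int) :
    get_multihop_select_where_vars s o h =
      match o with
      | none => ((PySem.List.pyRange 1 (max h 1 + 1) 1).flatMap pvFS,
                 (PySem.List.pyRange 1 (max h 1 + 1) 1).flatMap (pvFW s))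
      | some t => (((PySem.List.pyRange 1 (max h 1 + 1) 1).flatMap pvFS).dropLast,
                   ((PySem.List.pyRange 1 (max h 1 + 1) 1).flatMap (pvFW s)).dropLast
                     ++ ["wd:" ++ t ++ " ."]) := by
  have hr : PySem.List.pyRange (2:Int) (h + 1) 1 = PySem.List.pyRange 2 (max h 1 + 1) 1 := by
    by_cases hh : 1 ≤ h
    · rw [max_eq_left hh]
    · rw [max_eq_right (by omega), PySem.List.pyRange_one_eq_nil (by omega),
        PySem.List.pyRange_one_eq_nil (by omega)]
  have hfold : (PySem.List.pyRange 2 (max h 1 + 1) 1).foldl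
      (fun (st : List String × List String) i =>
        (st.1 ++ ["?p" ++ PySem.Int.toStr i, "?o" ++ PySem.Int.toStr i],
         st.2 ++ ["?o" ++ PySem.Int.toStr (i - 1), "?p" ++ PySem.Int.toStr i,
                  "?o" ++ PySem.Int.toStr i ++ " ."]))
      (["?p1", "?o1"], ["wd:" ++ s, "?p1", "?o1 ."])
      = ((PySem.List.pyRange 2 (max h 1 + 1) 1).foldl
           (fun a i => a ++ ["?p" ++ PySem.Int.toStr i, "?o" ++ PySem.Int.toStr i]) ["?p1", "?o1"],
         (PySem.List.pyRange 2 (max h 1 + 1) 1).foldl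
           (fun b i => b ++ ["?o" ++ PySem.Int.toStr (i - 1), "?p" ++ PySem.Int.toStr i,
                             "?o" ++ PySem.Int.toStr i ++ " ."]) ["wd:" ++ s, "?p1", "?o1 ."]) :=
    PySem.List.foldl_prod_mk
      (fun a i => a ++ ["?p" ++ PySem.Int.toStr i, "?o" ++ PySem.Int.toStr i])
      (fun b i => b ++ ["?o" ++ PySem.Int.toStr (i - 1), "?p" ++ PySem.Int.toStr i,
                        "?o" ++ PySem.Int.toStr i ++ " ."]) _ _ _
  have hgW : (PySem.List.pyRange 2 (max h 1 + 1) 1).flatMap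
      (fun i => ["?o" ++ PySem.Int.toStr (i - 1), "?p" ++ PySem.Int.toStr i,
                 "?o" ++ PySem.Int.toStr i ++ " ."])
      = (PySem.List.pyRange 2 (max h 1 + 1) 1).flatMap (pvFW s) := by
    simp only [List.flatMap_def]
    refine congrArg _ (List.map_congr_left ?_)
    intro i hi
    have := PySem.List.mem_pyRange_one.mp hi
    simp [pvFW, show i ≠ 1 by omega]
  have hsplit : PySem.List.pyRange (1:Int) (max h 1 + 1) 1
      = 1 :: PySem.List.pyRange 2 (max h 1 + 1) 1 := by
    rw [PySem.List.pyRange_one_cons (by omega)]; norm_num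
  have hFS : (fun (x : Int) => ["?p" ++ PySem.Int.toStr x, "?o" ++ PySem.Int.toStr x]) = pvFS := rfl
  simp only [get_multihop_select_where_vars, hr, hfold,
    PySem.List.foldl_append_eq_flatMap, hFS, hgW, hsplit, List.flatMap_cons, pvFS_one, pvFW_one]
  cases o <;> simp

lemma B_nodes_none (s : String) (n : Int) (hn : 1 ≤ n) :
    ("wd:" ++ s) :: (PySem.List.pyRange 1 (n + 1) 1).map (fun i => "?o" ++ PySem.Int.toStr i)
      = (PySem.List.pyRange 0 (n + 1) 1).map (pvNode s) := by
  have h0 : PySem.List.pyRange (0:Int) (n + 1) 1 = 0 :: PySem.List.pyRange 1 (n + 1) 1 := by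
    rw [PySem.List.pyRange_one_cons (by omega)]; norm_num
  rw [h0, List.map_cons]
  refine congrArg₂ _ (by simp [pvNode]) ?_
  refine (List.map_congr_left ?_).symm
  intro i hi
  have := PySem.List.mem_pyRange_one.mp hi
  simp [pvNode, show i ≠ 0 by omega]

lemma B_char (s : String) (o : Option String) (h : Int) :
    get_multihop_select_where_vars_alt s o h =
      match o with
      | none => ((PySem.List.pyRange 1 (max h 1 + 1) 1).flatMap pvFS,
                 (PySem.List.pyRange 1 (max h 1 + 1) 1).flatMap (pvFW s))
      | some t => (((PySem.List.pyRange 1 (max h 1 + 1) 1).flatMap pvFS).dropLast,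
                   ((PySem.List.pyRange 1 (max h 1 + 1) 1).flatMap (pvFW s)).dropLast
                     ++ ["wd:" ++ t ++ " ."]) := by
  have hn0 : (1:Int) ≤ max h 1 := le_max_right _ _
  cases o with
  | none =>
    simp only [get_multihop_select_where_vars_alt]
    generalize hgen : max h 1 = n at hn0 ⊢
    refine congrArg₂ _ rfl ?_
    rw [B_nodes_none s n hn0]
    simp only [List.flatMap_def]
    refine congrArg _ (List.map_congr_left ?_)
    intro i hi
    have hib := PySem.List.mem_pyRange_one.mp hi
    rw [PySem.List.pyGetD_map_pyRange_of_nonneg _ _ _ _ (by omega) (by omega),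
      PySem.List.pyGetD_map_pyRange_of_nonneg _ _ _ _ (by omega) (by omega)]
    rw [pvFW_eq_node s i (by omega)]
    simp [pvNode, show i ≠ 0 by omega]
  | some t =>
    simp only [get_multihop_select_where_vars_alt]
    generalize hgen : max h 1 = n at hn0 ⊢
    refine congrArg₂ _ rfl ?_
    -- the node chain with the target spliced in
    have hnodes :
        (((("wd:" ++ s) :: (PySem.List.pyRange 1 (n + 1) 1).map
            (fun i => "?o" ++ PySem.Int.toStr i)).dropLast) ++ ["wd:" ++ t])
          = (PySem.List.pyRange 0 (n + 1) 1).map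
              (fun j => if j = n then "wd:" ++ t else pvNode s j) := by
      rw [B_nodes_none s n hn0]
      have hsp : PySem.List.pyRange (0:Int) (n + 1) 1
          = PySem.List.pyRange 0 n 1 ++ [n] := PySem.List.pyRange_one_succ_right (by omega)
      rw [hsp, List.map_append, List.map_append]
      simp only [List.map_cons, List.map_nil, List.dropLast_concat]
      refine congrArg₂ _ (List.map_congr_left ?_) (by simp)
      intro j hj
      have := PySem.List.mem_pyRange_one.mp hj
      simp [show j ≠ n by omega]
    rw [hnodes]
    -- split the hop range at the last hop on both sides
    have hsp : PySem.List.pyRange (1:Int) (n + 1) 1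
        = PySem.List.pyRange 1 n 1 ++ [n] := PySem.List.pyRange_one_succ_right (by omega)
    rw [hsp, List.flatMap_append, List.flatMap_append]
    have hpre : (PySem.List.pyRange 1 n 1).flatMap
        (fun i => [PySem.List.pyGetD ((PySem.List.pyRange 0 (n + 1) 1).map
            (fun j => if j = n then "wd:" ++ t else pvNode s j)) (i - 1) "",
          "?p" ++ PySem.Int.toStr i,
          PySem.List.pyGetD ((PySem.List.pyRange 0 (n + 1) 1).map
            (fun j => if j = n then "wd:" ++ t else pvNode s j)) i "" ++ " ."])
        = (PySem.List.pyRange 1 n 1).flatMap (pvFW s) := by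
      simp only [List.flatMap_def]
      refine congrArg _ (List.map_congr_left ?_)
      intro i hi
      have hib := PySem.List.mem_pyRange_one.mp hi
      rw [PySem.List.pyGetD_map_pyRange_of_nonneg _ _ _ _ (by omega) (by omega),
        PySem.List.pyGetD_map_pyRange_of_nonneg _ _ _ _ (by omega) (by omega)]
      rw [pvFW_eq_node s i (by omega)]
      simp [pvNode, show i ≠ n by omega, show i - 1 ≠ n by omega, show i ≠ 0 by omega]
    rw [hpre]
    -- last triple on both sides
    have hlast : ([n] : List Int).flatMap
        (fun i => [PySem.List.pyGetD ((PySem.List.pyRange 0 (n + 1) 1).map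
            (fun j => if j = n then "wd:" ++ t else pvNode s j)) (i - 1) "",
          "?p" ++ PySem.Int.toStr i,
          PySem.List.pyGetD ((PySem.List.pyRange 0 (n + 1) 1).map
            (fun j => if j = n then "wd:" ++ t else pvNode s j)) i "" ++ " ."])
        = [pvNode s (n - 1), "?p" ++ PySem.Int.toStr n, "wd:" ++ t ++ " ."] := by
      simp only [List.flatMap_cons, List.flatMap_nil, List.append_nil]
      rw [PySem.List.pyGetD_map_pyRange_of_nonneg _ _ _ _ (by omega) (by omega),
        PySem.List.pyGetD_map_pyRange_of_nonneg _ _ _ _ (by omega) (by omega)]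
      simp [show n - 1 ≠ n by omega]
    rw [hlast]
    -- dropLast of (prefix ++ last-generic-triple)
    have hfwn : ([n] : List Int).flatMap (pvFW s)
        = ([pvNode s (n - 1), "?p" ++ PySem.Int.toStr n] ++ ["?o" ++ PySem.Int.toStr n ++ " ."]) := by
      simp only [List.flatMap_cons, List.flatMap_nil, List.append_nil]
      rw [pvFW_eq_node s n hn0]
      simp
    rw [hfwn, ← List.append_assoc, List.dropLast_concat]
    simp

-- ===== VERDICT (by name: the statement is the Claim_ definition above) =====
theorem get_multihop_select_where_vars_spec : Claim_equal_get_multihop_select_where_vars := by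
  intro subj obj hops _
  unfold Spec_get_multihop_select_where_vars
  rw [A_char, B_char]
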